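-- pv_equiv track=rewrite | github.com/Guneshwar24/Social_engineering_thesis | simple_attempt/mar7.py | contains_link
-- ===== SOURCE A (Python) =====
-- def contains_link(message):
--     if not isinstance(message, str):
--         return False
--     # Simple pattern matching for common link formats
--     link_patterns = [
--         "http://", "https://", "www.", ".com", ".org", ".net", ".io",
--         "link:", "click here", "check out"
--     ]
--     message_lower = message.lower()
--     return any(pattern in message_lower for pattern in link_patterns)
-- ===== SOURCE B (Python) =====
-- LINK_PATTERNS = [
--     "http://", "https://", "www.", ".com", ".org", ".net", ".io",
--     "link:", "click here", "check out"
-- ]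
--
--
-- def _ci_prefix_at(message, i, pattern):
--     # pattern (already lowercase) is a case-insensitive prefix of message[i:]?
--     if i + len(pattern) > len(message):
--         return False
--     return all(message[i + j].lower() == pattern[j] for j in range(len(pattern)))
--
--
-- def contains_link(message):
--     if not isinstance(message, str):
--         return False
--     # single left-to-right scan: at each position try every pattern,
--     # lowering characters on the fly instead of lowering the whole message
--     for i in range(len(message)):
--         if any(_ci_prefix_at(message, i, p) for p in LINK_PATTERNS):
--             return True
--     return False
-- ===== Notes on version B (the rewrite author's own statement) =====
-- stated objective: alternative
-- what changed: A lowercases the whole message and runs ten separate substring scans, one per pattern; B makes a single left-to-right scan over the original message, testing at each position whether any pattern is a case-insensitive prefix there, lowering characters on the fly.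
import Mathlib
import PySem

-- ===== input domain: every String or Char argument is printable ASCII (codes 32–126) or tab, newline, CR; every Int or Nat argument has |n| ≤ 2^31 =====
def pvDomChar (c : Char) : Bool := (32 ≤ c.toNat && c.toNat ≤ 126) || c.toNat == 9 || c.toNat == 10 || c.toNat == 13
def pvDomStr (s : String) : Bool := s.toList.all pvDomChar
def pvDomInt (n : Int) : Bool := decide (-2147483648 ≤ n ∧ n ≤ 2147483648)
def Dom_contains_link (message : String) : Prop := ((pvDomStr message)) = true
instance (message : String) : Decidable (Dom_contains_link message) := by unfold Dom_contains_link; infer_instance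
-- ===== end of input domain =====

-- ===== PORT A =====
-- B makes one case-insensitive scan instead of A's lower-then-ten-substring-scans; return-value equivalence.
def linkPatterns : List String :=
  ["http://", "https://", "www.", ".com", ".org", ".net", ".io",
   "link:", "click here", "check out"]

def contains_link (message : String) : Bool :=
  let message_lower := PySem.Str.lower message
  linkPatterns.any (fun pattern => PySem.Str.isIn pattern message_lower)

-- ===== PORT B =====
-- _ci_prefix_at: pattern is a case-insensitive prefix of the suffix starting here
def ciPrefix : List Char → List Char → Bool
  | [], _ => true
  | _ :: _, [] => false
  | p :: ps, c :: cs => (PySem.Chars.lowerChar c == p) && ciPrefix ps cs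

-- the inner 'any(...)' over the patterns at one position
def matchesAt (suffix : List Char) : Bool :=
  linkPatterns.any (fun p => ciPrefix p.toList suffix)

-- the 'for i in range(len(message))' scan, as recursion on the suffixes
def scanLink : List Char → Bool
  | [] => false
  | c :: cs => matchesAt (c :: cs) || scanLink cs

def contains_link_alt (message : String) : Bool :=
  scanLink message.toList

-- ===== PRECONDITION & SPEC =====
def Spec_contains_link (message : String) (out : Bool) : Prop := out = contains_link_alt message
instance (message : String) (out : Bool) : Decidable (Spec_contains_link message out) := by unfold Spec_contains_link; infer_instance

-- ===== CLAIM (what is proved, stated in full; the proofs are below) =====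
def Claim_equal_contains_link : Prop := ∀ (message : String), Dom_contains_link message → Spec_contains_link message (contains_link message)

-- ===== LEMMAS AND PROOFS =====

-- ciPrefix compares lowered message chars with the (lowercase) pattern chars
theorem ciPrefix_iff (p s : List Char) :
    ciPrefix p s = true ↔ p <+: s.map PySem.Chars.lowerChar := by
  induction p generalizing s with
  | nil => simp [ciPrefix]
  | cons x xs ih =>
    cases s with
    | nil => simp [ciPrefix]
    | cons c cs =>
      simp only [ciPrefix, List.map_cons, List.cons_prefix_cons, Bool.and_eq_true, beq_iff_eq, ih]
      constructor
      · rintro ⟨h1, h2⟩; exact ⟨h1.symm, h2⟩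
      · rintro ⟨h1, h2⟩; exact ⟨h1.symm, h2⟩

theorem scanLink_iff (s : List Char) :
    scanLink s = true ↔ ∃ j, matchesAt (s.drop j) = true := by
  induction s with
  | nil =>
    have h0 : matchesAt [] = false := by decide
    constructor
    · intro h; simp [scanLink] at h
    · rintro ⟨j, hj⟩; rw [List.drop_nil, h0] at hj; exact absurd hj (by simp)
  | cons c cs ih =>
    constructor
    · intro h
      rcases Bool.or_eq_true_iff.mp h with h | h
      · exact ⟨0, h⟩
      · rcases ih.mp h with ⟨j, hj⟩
        exact ⟨j + 1, hj⟩
    · rintro ⟨j, hj⟩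
      cases j with
      | zero => exact Bool.or_eq_true_iff.mpr (Or.inl hj)
      | succ j => exact Bool.or_eq_true_iff.mpr (Or.inr (ih.mpr ⟨j, hj⟩))

theorem contains_link_eq (message : String) :
    contains_link message = contains_link_alt message := by
  have hlow : (PySem.Str.lower message).toList
      = message.toList.map PySem.Chars.lowerChar := by
    simp [PySem.Chars.lower]
  rcases hA : contains_link message with _ | _ <;>
    rcases hB : contains_link_alt message with _ | _
  · rfl
  · -- B found a match, A did not: contradiction
    exfalso
    have hb : scanLink message.toList = true := hB
    rcases (scanLink_iff _).mp hb with ⟨j, hj⟩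
    rcases List.any_eq_true.mp hj with ⟨p, hp, hpre⟩
    have : contains_link message = true := by
      unfold contains_link
      refine List.any_eq_true.mpr ⟨p, hp, ?_⟩
      rw [PySem.Str.isIn_eq, hlow]
      refine (PySem.Chars.exists_prefix_drop_iff_isIn _ _).mp ⟨j, ?_⟩
      rw [← List.map_drop]
      exact (ciPrefix_iff _ _).mp hpre
    simp [hA] at this
  · -- A found a match, B did not: contradiction
    exfalso
    unfold contains_link at hA
    rcases List.any_eq_true.mp hA with ⟨p, hp, hin⟩
    rw [PySem.Str.isIn_eq, hlow] at hin
    rcases (PySem.Chars.exists_prefix_drop_iff_isIn _ _).mpr hin with ⟨j, hj⟩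
    have : contains_link_alt message = true := by
      unfold contains_link_alt
      refine (scanLink_iff _).mpr ⟨j, List.any_eq_true.mpr ⟨p, hp, ?_⟩⟩
      rw [ciPrefix_iff, List.map_drop]
      exact hj
    simp [hB] at this
  · rfl

-- ===== VERDICT (by name: the statement is the Claim_ definition above) =====
theorem contains_link_spec : Claim_equal_contains_link := by
  intro message _
  unfold Spec_contains_link
  exact contains_link_eq message
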